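-- pv_equiv track=rewrite | github.com/prankard/RandomMetroidSolver | solver.py | energyReserveCountOkList
-- ===== SOURCE A (Python) =====
-- def wor2(a, b, difficulty=0):
--     if a[0] is True and b[0] is True:
--         return (True, min(a[1], b[1]) + difficulty)
--     elif a[0] is True:
--         return (True, a[1] + difficulty)
--     elif b[0] is True:
--         return (True, b[1] + difficulty)
--     else:
--         return (False, 0)
--
-- def wor(a, b, c=None, d=None, difficulty=0):
--     if c is None and d is None:
--         ret = wor2(a, b)
--     elif c is None:
--         ret = wor2(wor2(a, b), d)
--     elif d is None:
--         ret = wor2(wor2(a, b), c)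
--     else:
--         ret = wor2(wor2(wor2(a, b), c), d)
--
--     if ret[0] is True:
--         return (ret[0], ret[1] + difficulty)
--     else:
--         return (False, 0)
--
-- def itemCount(items, item):
--     return items.count(item)
--
-- def energyReserveCount(items):
--     return itemCount(items, 'ETank') + itemCount(items, 'Reserve')
--
-- def energyReserveCountOk(items, count, difficulty=0):
--     return (energyReserveCount(items) >= count, difficulty)
--
-- def energyReserveCountOkList(items, difficulties):
--     # get a list: [(2, difficulty=hard), (4, difficulty=medium), (6, difficulty=easy)]
--     difficulties = difficulties[:] # copy
--     difficulty = difficulties.pop(0)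
--     result = energyReserveCountOk(items, difficulty[0], difficulty=difficulty[1])
--     while len(difficulties) > 0:
--         difficulty = difficulties.pop(0)
--         result = wor(result, energyReserveCountOk(items, difficulty[0], difficulty=difficulty[1]))
--     return result
-- ===== SOURCE B (Python) =====
-- def energyReserveCountOkList(items, difficulties):
--     n = items.count('ETank') + items.count('Reserve')
--     best = None
--     for count, diff in difficulties:
--         if n >= count and (best is None or diff < best):
--             best = diff
--     if best is None:
--         return (False, 0)
--     return (True, best)
-- ===== Notes on version B (the rewrite author's own statement) =====
-- stated objective: faster
-- what changed: Replaces the generic wor/wor2 OR-combinator fold over intermediate (bool, difficulty) pairs with one counting of tanks and a single running-minimum scan over the difficulty entries.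
-- intended difference: On a one-entry difficulty list whose threshold is not met and whose difficulty value is nonzero, A returns (False, that difficulty) because the initial pair is never run through wor, while B returns (False, 0) like A does for every other failing input; (False, 0) is the intended failure value. — e.g. on energyReserveCountOkList(["x"], [(1, 5)]): A returns (false, 5), B returns (false, 0)
import Mathlib
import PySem

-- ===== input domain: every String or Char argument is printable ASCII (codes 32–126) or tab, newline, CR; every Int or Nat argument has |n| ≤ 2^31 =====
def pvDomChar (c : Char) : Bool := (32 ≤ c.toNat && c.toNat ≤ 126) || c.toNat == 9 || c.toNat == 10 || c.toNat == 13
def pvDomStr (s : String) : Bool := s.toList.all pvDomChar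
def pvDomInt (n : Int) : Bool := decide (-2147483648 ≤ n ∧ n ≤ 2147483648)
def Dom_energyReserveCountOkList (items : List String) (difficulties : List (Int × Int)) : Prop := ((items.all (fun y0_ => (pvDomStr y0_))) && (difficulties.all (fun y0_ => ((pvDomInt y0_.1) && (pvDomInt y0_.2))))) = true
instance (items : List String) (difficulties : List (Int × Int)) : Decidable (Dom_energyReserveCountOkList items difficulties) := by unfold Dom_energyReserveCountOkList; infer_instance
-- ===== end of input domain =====

-- B replaces A's wor/wor2 OR-combinator fold by one tank count and a single
-- running-minimum scan over the difficulty list, counting the tanks once instead of once per entry.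

-- ===== PORT A =====
def pvItemCount (items : List String) (item : String) : Int :=
  PySem.List.count items item

def pvEnergyReserveCount (items : List String) : Int :=
  pvItemCount items "ETank" + pvItemCount items "Reserve"

def pvEnergyReserveCountOk (items : List String) (count difficulty : Int) : Bool × Int :=
  (decide (pvEnergyReserveCount items ≥ count), difficulty)

def pvWor2 (a b : Bool × Int) (difficulty : Int) : Bool × Int :=
  if a.1 = true ∧ b.1 = true then (true, min a.2 b.2 + difficulty)
  else if a.1 = true then (true, a.2 + difficulty)
  else if b.1 = true then (true, b.2 + difficulty)
  else (false, 0)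

def pvWor (a b : Bool × Int) (c d : Option (Bool × Int)) (difficulty : Int) : Bool × Int :=
  let ret :=
    match c, d with
    | none, none => pvWor2 a b 0
    | none, some d' => pvWor2 (pvWor2 a b 0) d' 0
    | some c', none => pvWor2 (pvWor2 a b 0) c' 0
    | some c', some d' => pvWor2 (pvWor2 (pvWor2 a b 0) c' 0) d' 0
  if ret.1 = true then (ret.1, ret.2 + difficulty) else (false, 0)

-- the while loop pops from the front: first entry seeds `result`, rest are folded through wor
def energyReserveCountOkList (items : List String) (difficulties : List (Int × Int)) : Bool × Int :=
  match difficulties with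
  | [] => (false, 0)  -- Python raises IndexError here; excluded by Pre_
  | d0 :: rest =>
    rest.foldl
      (fun result d => pvWor result (pvEnergyReserveCountOk items d.1 d.2) none none 0)
      (pvEnergyReserveCountOk items d0.1 d0.2)

-- ===== PORT B =====
def energyReserveCountOkList_alt (items : List String) (difficulties : List (Int × Int)) : Bool × Int :=
  let n : Int := PySem.List.count items "ETank" + PySem.List.count items "Reserve"
  let best := difficulties.foldl
    (fun (best : Option Int) d =>
      if decide (n ≥ d.1) && (match best with | none => true | some b => decide (d.2 < b))
      then some d.2 else best) none
  match best with
  | none => (false, 0)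
  | some b => (true, b)

-- ===== PRECONDITION & SPEC =====
-- Pre_ excludes only the empty difficulty list, on which Python A raises IndexError.
def Pre_energyReserveCountOkList (items : List String) (difficulties : List (Int × Int)) : Prop :=
  difficulties ≠ []
instance (items : List String) (difficulties : List (Int × Int)) : Decidable (Pre_energyReserveCountOkList items difficulties) := by unfold Pre_energyReserveCountOkList; infer_instance

def pvWitness_energyReserveCountOkList : List String × (List (Int × Int)) := (["ETank"], [(1, 2)])

-- On a one-entry difficulty list whose threshold is not met and whose difficulty value is nonzero,
-- A returns (False, that difficulty) because the seeding pair is never run through wor, while B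
-- returns (False, 0) like A does for every other failing input; (False, 0) is the intended failure value.
def D_energyReserveCountOkList (items : List String) (difficulties : List (Int × Int)) : Prop :=
  difficulties.length = 1 ∧
  ((PySem.List.count items "ETank" : Int) + PySem.List.count items "Reserve") < (difficulties.headD (0, 0)).1 ∧
  (difficulties.headD (0, 0)).2 ≠ 0
instance (items : List String) (difficulties : List (Int × Int)) : Decidable (D_energyReserveCountOkList items difficulties) := by unfold D_energyReserveCountOkList; infer_instance

def Spec_energyReserveCountOkList (items : List String) (difficulties : List (Int × Int)) (out : Bool × Int) : Prop := ¬ D_energyReserveCountOkList items difficulties → out = energyReserveCountOkList_alt items difficulties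
instance (items : List String) (difficulties : List (Int × Int)) (out : Bool × Int) : Decidable (Spec_energyReserveCountOkList items difficulties out) := by unfold Spec_energyReserveCountOkList; infer_instance

def pvDiffWitness_energyReserveCountOkList : List String × (List (Int × Int)) := (["x"], [(1, 5)])
def pvDiffWitnessOut_energyReserveCountOkList : (Bool × Int) × (Bool × Int) := ((false, 5), (false, 0))

-- ===== CLAIM (what is proved, stated in full; the proofs are below) =====
def Claim_unchanged_energyReserveCountOkList : Prop := ∀ (items : List String) (difficulties : List (Int × Int)), Dom_energyReserveCountOkList items difficulties → Pre_energyReserveCountOkList items difficulties → Spec_energyReserveCountOkList items difficulties (energyReserveCountOkList items difficulties)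
def Claim_changed_energyReserveCountOkList : Prop := Dom_energyReserveCountOkList (pvDiffWitness_energyReserveCountOkList.1) (pvDiffWitness_energyReserveCountOkList.2) ∧ Pre_energyReserveCountOkList (pvDiffWitness_energyReserveCountOkList.1) (pvDiffWitness_energyReserveCountOkList.2) ∧ D_energyReserveCountOkList (pvDiffWitness_energyReserveCountOkList.1) (pvDiffWitness_energyReserveCountOkList.2) ∧ energyReserveCountOkList (pvDiffWitness_energyReserveCountOkList.1) (pvDiffWitness_energyReserveCountOkList.2) = pvDiffWitnessOut_energyReserveCountOkList.1 ∧ energyReserveCountOkList_alt (pvDiffWitness_energyReserveCountOkList.1) (pvDiffWitness_energyReserveCountOkList.2) = pvDiffWitnessOut_energyReserveCountOkList.2 ∧ pvDiffWitnessOut_energyReserveCountOkList.1 ≠ pvDiffWitnessOut_energyReserveCountOkList.2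
def Claim_exact_energyReserveCountOkList : Prop := ∀ (items : List String) (difficulties : List (Int × Int)), Dom_energyReserveCountOkList items difficulties → Pre_energyReserveCountOkList items difficulties → D_energyReserveCountOkList items difficulties → energyReserveCountOkList items difficulties ≠ energyReserveCountOkList_alt items difficulties

-- ===== LEMMAS AND PROOFS =====

-- minimum difficulty over qualifying entries (the common characterisation of both folds)
def pvM (n : Int) : List (Int × Int) → Option Int
  | [] => none
  | d :: tl =>
    if n ≥ d.1 then some (match pvM n tl with | none => d.2 | some k => min d.2 k)
    else pvM n tl

-- A-side loop, started from a True result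
theorem pvA_true (items : List String) (ds : List (Int × Int)) (m : Int) :
    ds.foldl (fun result d => pvWor result (pvEnergyReserveCountOk items d.1 d.2) none none 0) (true, m)
      = (true, match pvM (pvEnergyReserveCount items) ds with | none => m | some k => min m k) := by
  induction ds generalizing m with
  | nil => simp [pvM]
  | cons d tl ih =>
    simp only [List.foldl_cons, pvM]
    by_cases h : pvEnergyReserveCount items ≥ d.1
    · have : pvWor (true, m) (pvEnergyReserveCountOk items d.1 d.2) none none 0 = (true, min m d.2) := by
        simp [pvWor, pvWor2, pvEnergyReserveCountOk, h]
      rw [this, ih]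
      cases hM : pvM (pvEnergyReserveCount items) tl <;> simp [h] <;> omega
    · have : pvWor (true, m) (pvEnergyReserveCountOk items d.1 d.2) none none 0 = (true, m) := by
        simp [pvWor, pvWor2, pvEnergyReserveCountOk, h]
      rw [this, ih]
      simp [h]

-- A-side loop, started from a False result, on a nonempty remainder
theorem pvA_false (items : List String) (ds : List (Int × Int)) (x : Int) (hne : ds ≠ []) :
    ds.foldl (fun result d => pvWor result (pvEnergyReserveCountOk items d.1 d.2) none none 0) (false, x)
      = (match pvM (pvEnergyReserveCount items) ds with | none => (false, 0) | some k => (true, k)) := by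
  induction ds generalizing x with
  | nil => exact absurd rfl hne
  | cons d tl ih =>
    simp only [List.foldl_cons, pvM]
    by_cases h : pvEnergyReserveCount items ≥ d.1
    · have : pvWor (false, x) (pvEnergyReserveCountOk items d.1 d.2) none none 0 = (true, d.2) := by
        simp [pvWor, pvWor2, pvEnergyReserveCountOk, h]
      rw [this, pvA_true]
      cases hM : pvM (pvEnergyReserveCount items) tl <;> simp [h, hM]
    · have hstep : pvWor (false, x) (pvEnergyReserveCountOk items d.1 d.2) none none 0 = (false, 0) := by
        simp [pvWor, pvWor2, pvEnergyReserveCountOk, h]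
      rw [hstep]
      cases tl with
      | nil => simp [pvM, h]
      | cons t ts =>
        rw [ih 0 (by simp)]
        simp [h]

-- B-side loop computes the same minimum
theorem pvB_fold (n : Int) (ds : List (Int × Int)) (b : Option Int) :
    ds.foldl
      (fun (best : Option Int) d =>
        if decide (n ≥ d.1) && (match best with | none => true | some v => decide (d.2 < v))
        then some d.2 else best) b
      = (match b, pvM n ds with
         | none, none => none
         | some v, none => some v
         | none, some k => some k
         | some v, some k => some (min v k)) := by
  induction ds generalizing b with
  | nil => cases b <;> simp [pvM]
  | cons d tl ih =>
    simp only [List.foldl_cons]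
    by_cases h : n ≥ d.1
    · cases b with
      | none =>
        have hc : (decide (n ≥ d.1) && (match (none : Option Int) with | none => true | some v => decide (d.2 < v))) = true := by simp [h]
        rw [hc]
        simp only [if_true]
        rw [ih]
        cases hM : pvM n tl <;> simp [pvM, h, hM]
      | some v =>
        by_cases hv : d.2 < v
        · have hc : (decide (n ≥ d.1) && (match (some v : Option Int) with | none => true | some b => decide (d.2 < b))) = true := by simp [h, hv]
          rw [hc]
          simp only [if_true]
          rw [ih]
          cases hM : pvM n tl <;> simp [pvM, h, hM] <;> omega
        · have hc : (decide (n ≥ d.1) && (match (some v : Option Int) with | none => true | some b => decide (d.2 < b))) = false := by simp [h, hv]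
          rw [hc]
          simp only [Bool.false_eq_true, if_false]
          rw [ih]
          cases hM : pvM n tl <;> simp [pvM, h, hM] <;> omega
    · have hc : (decide (n ≥ d.1) && (match b with | none => true | some v => decide (d.2 < v))) = false := by
        simp [h]
      rw [hc]
      simp only [Bool.false_eq_true, if_false]
      rw [ih]
      cases b <;> simp [pvM, h]

theorem pvCount_eq (items : List String) :
    pvEnergyReserveCount items = PySem.List.count items "ETank" + PySem.List.count items "Reserve" := rfl

-- ===== VERDICT (by name: the statement is the Claim_ definition above) =====
theorem energyReserveCountOkList_spec : Claim_unchanged_energyReserveCountOkList := by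
  intro items difficulties _hDom hPre hND
  cases difficulties with
  | nil => exact absurd rfl hPre
  | cons d0 tl =>
    unfold energyReserveCountOkList energyReserveCountOkList_alt
    simp only [List.foldl_cons]
    rw [← pvCount_eq]
    by_cases h0 : pvEnergyReserveCount items ≥ d0.1
    · have hinit : pvEnergyReserveCountOk items d0.1 d0.2 = (true, d0.2) := by
        simp [pvEnergyReserveCountOk, h0]
      have hb0 : (if decide (pvEnergyReserveCount items ≥ d0.1) &&
            (match (none : Option Int) with | none => true | some v => decide (d0.2 < v))
          then some d0.2 else none) = some d0.2 := by simp [h0]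
      rw [hinit, pvA_true, hb0, pvB_fold]
      cases hM : pvM (pvEnergyReserveCount items) tl <;> simp [hM]
    · have hinit : pvEnergyReserveCountOk items d0.1 d0.2 = (false, d0.2) := by
        simp [pvEnergyReserveCountOk, h0]
      have hb0 : (if decide (pvEnergyReserveCount items ≥ d0.1) &&
            (match (none : Option Int) with | none => true | some v => decide (d0.2 < v))
          then some d0.2 else none) = none := by simp [h0]
      rw [hinit, hb0, pvB_fold]
      cases tl with
      | nil =>
        have hz : d0.2 = 0 := by
          by_contra hz
          exact hND ⟨by simp, by rw [← pvCount_eq]; simpa using (by omega : pvEnergyReserveCount items < d0.1), by simpa using hz⟩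
        simp [pvM, h0, hz]
      | cons t ts =>
        rw [pvA_false items (t :: ts) d0.2 (by simp)]
        cases hM : pvM (pvEnergyReserveCount items) (t :: ts) <;> simp [hM]

theorem energyReserveCountOkList_changed : Claim_changed_energyReserveCountOkList := by
  unfold Claim_changed_energyReserveCountOkList; decide

theorem energyReserveCountOkList_tight : Claim_exact_energyReserveCountOkList := by
  intro items difficulties _hDom _hPre hD
  obtain ⟨hlen, hlt, hnz⟩ := hD
  cases difficulties with
  | nil => simp at hlen
  | cons d0 tl =>
    cases tl with
    | cons t ts => simp at hlen
    | nil =>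
      simp only [List.headD] at hlt hnz
      have h0 : ¬ pvEnergyReserveCount items ≥ d0.1 := by rw [pvCount_eq]; omega
      unfold energyReserveCountOkList energyReserveCountOkList_alt
      simp only [List.foldl_cons, List.foldl_nil]
      rw [← pvCount_eq]
      simp [pvEnergyReserveCountOk, h0, hnz]
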